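/- GENERATED by tools/from_farm_form.py from prooffarm-gif/accepted/digest_file.6/Proof.lean (a worked proof of the farm's unit `digest_file.6`,
   accepted by the verdict) — do not edit. -/
import Gif.Spec.Units.digest_file_6
import Gif.Spec.AllSegs
import Gif.Spec.Proved.digest_file_6_Lemmas

open X86 X86.User Asan ProgX.Base ProgX.Base.Spec Gif.Spec

namespace Gif.Spec.digest_file_6

end Gif.Spec.digest_file_6

/-- Segment 6 of `digest_file` (10594BH … 1059AFH; gif_driver.c:167-170, 158): THE SECOND HALF OF ONE ROUND of the image loop, from
`Round` at 10594BH back to the head with a smaller measure. Four stages (Lemmas.lean §2), each from `Round` at a cut or a return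
address to `Round` at the next return address: `digest_map` of the image's colour map (10594BH … 105960H), `digest_bytes` of its
raster (… 10597BH), `digest_extensions` of its extension list (… 1059A2H), then `[rsp] = h`, `total += n`, `k++` (… 1059AFH). -/
theorem Gif.Spec.Proved.digest_file_6_ok : Gif.Spec.digest_file_6.Statement := by
  intro Lay hLay μ hμ u₀ hcode h_digest_map h_digest_bytes h_digest_extensions h_load8 h_load4
  intro H rest frames F R e ret m v hround
  -- 10594BH … 105960H, gif_driver.c:167: `digest_map(h, sp->ImageDesc.ColorMap)`
  refine (Gif.Spec.digest_file_6.seg6_stageA hLay hμ hcode h_digest_map h_load8 hround).trans ?_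
  intro v1 hv1
  -- 105960H … 10597BH, gif_driver.c:168: `digest_bytes(h, sp->RasterBits, n)`
  refine (Gif.Spec.digest_file_6.seg6_stageB hLay hμ hcode h_digest_bytes h_load8 hv1).trans ?_
  intro v2 hv2
  -- 10597BH … 1059A2H, gif_driver.c:169: `digest_extensions(h, sp->ExtensionBlockCount, sp->ExtensionBlocks)`
  refine (Gif.Spec.digest_file_6.seg6_stageC hLay hμ hcode h_digest_extensions h_load8 h_load4 hv2).trans ?_
  intro v3 hv3
  -- 1059A2H … 1059AFH, gif_driver.c:169-170, 158: `[rsp] = h`, `total += n`, `k++`: the head, a smaller measure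
  exact Gif.Spec.digest_file_6.seg6_stageD hLay hμ hcode hv3
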